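-- pv_equiv track=rewrite | github.com/ZerotakerZX/Python | TestFormulas/operators.py | task9184b
-- ===== SOURCE A (Python) =====
-- def task9184b(sentence):
--     temp1 = [i for i, x in enumerate(sentence) if x == "("] #засекаем индексы всех скобок одного вида в отдельыне списки
--     temp2 = [i for i, x in enumerate(sentence) if x == ")"]
--     if len(temp1) < len(temp2):
--         temp1.append(len(sentence)) #для равной длинны этих списков к более короткому добавляем число равное длинее предложения
--     else:
--         temp2.append(len(sentence))
--     for i, j in zip(temp1, temp2): #разом проходим оба списка и смотрим где закрывающая скобка имеет меньший индекс, чем отркывающая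
--         if i >= j:
--             return j +1 #добавим однёрку для компенсации отсчёта с нуля и будет место, где первая лишняя скобка
-- ===== SOURCE B (Python) =====
-- def task9184b(sentence):
--     balance = 0
--     for i, c in enumerate(sentence):
--         if c == "(":
--             balance += 1
--         elif c == ")":
--             balance -= 1
--             if balance < 0:
--                 return i + 1
-- ===== Notes on version B (the rewrite author's own statement) =====
-- stated objective: faster
-- what changed: Replaced the two filtered index lists, sentinel padding and zip scan by a single forward pass keeping a running parenthesis balance, returning i+1 the first time the balance goes negative.
import Mathlib
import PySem

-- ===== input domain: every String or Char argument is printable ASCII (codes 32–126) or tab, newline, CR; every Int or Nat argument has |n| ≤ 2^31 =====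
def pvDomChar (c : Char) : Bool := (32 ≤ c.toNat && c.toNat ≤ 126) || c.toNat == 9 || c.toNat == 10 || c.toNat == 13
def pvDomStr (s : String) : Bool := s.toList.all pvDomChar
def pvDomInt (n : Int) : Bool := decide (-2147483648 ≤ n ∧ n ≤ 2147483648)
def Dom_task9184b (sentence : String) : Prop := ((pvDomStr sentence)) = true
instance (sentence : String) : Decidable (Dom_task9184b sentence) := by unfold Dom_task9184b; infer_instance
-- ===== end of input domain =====

-- B replaces A's two filtered index lists + sentinel padding + zip scan by one
-- forward pass with a running balance counter (objective: simpler).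

-- ===== PORT A =====
-- the 'for i, j in zip(temp1, temp2): if i >= j: return j + 1' loop (implicit None at the end)
def task9184bLoop : List (Int × Int) → Option Int
  | [] => none
  | (i, j) :: rest => if i ≥ j then some (j + 1) else task9184bLoop rest

def task9184b (sentence : String) : Option Int :=
  let l := sentence.toList
  let temp1 := ((PySem.List.enumerate l).filter (fun p => p.2 == '(')).map (fun p => p.1)
  let temp2 := ((PySem.List.enumerate l).filter (fun p => p.2 == ')')).map (fun p => p.1)
  let tt : List Int × List Int :=
    if temp1.length < temp2.length then (temp1 ++ [(l.length : Int)], temp2)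
    else (temp1, temp2 ++ [(l.length : Int)])
  task9184bLoop (tt.1.zip tt.2)

-- ===== PORT B =====
-- the 'for i, c in enumerate(sentence)' loop carrying the running balance
def task9184bScan : Int → Int → List Char → Option Int
  | _, _, [] => none
  | bal, i, c :: rest =>
    if c = '(' then task9184bScan (bal + 1) (i + 1) rest
    else if c = ')' then
      (if bal - 1 < 0 then some (i + 1) else task9184bScan (bal - 1) (i + 1) rest)
    else task9184bScan bal (i + 1) rest

def task9184b_alt (sentence : String) : Option Int :=
  task9184bScan 0 0 sentence.toList

-- ===== PRECONDITION & SPEC =====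
def Spec_task9184b (sentence : String) (out : Option Int) : Prop := out = task9184b_alt sentence
instance (sentence : String) (out : Option Int) : Decidable (Spec_task9184b sentence out) := by unfold Spec_task9184b; infer_instance

-- ===== CLAIM (what is proved, stated in full; the proofs are below) =====
def Claim_equal_task9184b : Prop := ∀ (sentence : String), Dom_task9184b sentence → Spec_task9184b sentence (task9184b sentence)

-- ===== LEMMAS AND PROOFS =====

-- index list of occurrences of character c, enumeration starting at s
def pvIdxs (c : Char) (s : Int) (l : List Char) : List Int :=
  ((PySem.List.enumerate l s).filter (fun p => p.2 == c)).map (fun p => p.1)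

theorem pvIdxs_nil (c : Char) (s : Int) : pvIdxs c s [] = [] := rfl

theorem pvIdxs_cons (c x : Char) (s : Int) (t : List Char) :
    pvIdxs c s (x :: t) = if x = c then s :: pvIdxs c (s + 1) t else pvIdxs c (s + 1) t := by
  simp [pvIdxs, PySem.List.enumerate_cons]
  by_cases h : x = c <;> simp [h]

theorem pvIdxs_bounds (c : Char) (s : Int) (l : List Char) :
    ∀ x ∈ pvIdxs c s l, s ≤ x ∧ x < s + l.length := by
  induction l generalizing s with
  | nil => simp [pvIdxs_nil]
  | cons a t ih =>
    intro x hx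
    rw [pvIdxs_cons] at hx
    have step : x ∈ pvIdxs c (s + 1) t → s ≤ x ∧ x < s + (a :: t).length := by
      intro h
      have := ih (s + 1) x h
      constructor <;> [omega; (simp only [List.length_cons]; push_cast; omega)]
    by_cases h : a = c
    · simp [h] at hx
      rcases hx with h0 | h1
      · subst h0; simp only [List.length_cons]; push_cast; omega
      · exact step h1
    · simp [h] at hx
      exact step hx

-- abstract "first unmatched close" recursion, with o pending opens, enumeration start s
def pvF : Nat → Int → List Char → Option Int
  | _, _, [] => none
  | o, s, c :: t =>
    if c = '(' then pvF (o + 1) (s + 1) t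
    else if c = ')' then
      (match o with
       | 0 => some (s + 1)
       | o' + 1 => pvF o' (s + 1) t)
    else pvF o (s + 1) t

-- A's generalized form: o closes already matched against pending opens
def pvAg (o : Nat) (s : Int) (l : List Char) : Option Int :=
  let O := pvIdxs '(' s l
  let C := pvIdxs ')' s l
  let Op := if o + O.length < C.length then O ++ [s + (l.length : Int)] else O
  task9184bLoop (Op.zip (C.drop o))

theorem pvLoop_skip (x j : Int) (X D : List Int) (h : ¬ x ≥ j) :
    task9184bLoop ((x :: X).zip (j :: D)) = task9184bLoop (X.zip D) := by
  simp [task9184bLoop, h]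

theorem pvIdxs_cons_self (c : Char) (s : Int) (t : List Char) :
    pvIdxs c s (c :: t) = s :: pvIdxs c (s + 1) t := by
  rw [pvIdxs_cons, if_pos rfl]

theorem pvIdxs_cons_ne {x c : Char} (h : x ≠ c) (s : Int) (t : List Char) :
    pvIdxs c s (x :: t) = pvIdxs c (s + 1) t := by
  rw [pvIdxs_cons, if_neg h]

theorem pvScan_eq_pvF (l : List Char) : ∀ (b : Nat) (s : Int),
    task9184bScan (b : Int) s l = pvF b s l := by
  induction l with
  | nil => intro b s; rfl
  | cons c t ih =>
    intro b s
    by_cases h1 : c = '('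
    · subst h1
      simp only [task9184bScan, pvF, if_true]
      have hb : (b : Int) + 1 = ((b + 1 : Nat) : Int) := by push_cast; ring
      rw [hb, ih]
    · by_cases h2 : c = ')'
      · subst h2
        simp only [task9184bScan, pvF, if_neg (show ¬ (')' = '(') from by decide), if_true]
        match b with
        | 0 => rfl
        | b' + 1 =>
          have hcond : ¬ (((b' + 1 : Nat) : Int) - 1 < 0) := by push_cast; omega
          rw [if_neg hcond]
          have hcast : ((b' + 1 : Nat) : Int) - 1 = ((b' : Nat) : Int) := by push_cast; ring
          rw [hcast, ih]
      · simp only [task9184bScan, pvF, if_neg h1, if_neg h2]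
        exact ih b (s + 1)

theorem pvAg_eq_pvF (l : List Char) : ∀ (o : Nat) (s : Int), pvAg o s l = pvF o s l := by
  induction l with
  | nil => intro o s; simp [pvAg, pvIdxs_nil, pvF, task9184bLoop]
  | cons c t ih =>
    intro o s
    by_cases h1 : c = '('
    · -- head '(': the new open at index s pairs with a close of index > s, pair skipped
      subst h1
      simp only [pvF, if_true]
      rw [← ih (o + 1) (s + 1)]
      simp only [pvAg, pvIdxs_cons_self, pvIdxs_cons_ne (show '(' ≠ ')' from by decide),
        List.length_cons, List.cons_append]
      have hlen : s + (((t.length + 1 : Nat)) : Int) = (s + 1) + ((t.length : Nat) : Int) := by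
        push_cast; ring
      rw [hlen]
      by_cases h : (o + 1) + (pvIdxs '(' (s + 1) t).length < (pvIdxs ')' (s + 1) t).length
      all_goals (
        first
        | rw [if_pos (show o + ((pvIdxs '(' (s + 1) t).length + 1) < (pvIdxs ')' (s + 1) t).length from by omega),
              if_pos h]
        | rw [if_neg (show ¬ (o + ((pvIdxs '(' (s + 1) t).length + 1) < (pvIdxs ')' (s + 1) t).length) from by omega),
              if_neg h])
      all_goals (
        rcases hD : (pvIdxs ')' (s + 1) t).drop o with _ | ⟨j, D⟩
        · have h1d : (pvIdxs ')' (s + 1) t).drop (o + 1) = [] := by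
            have := congrArg (List.drop 1) hD
            simpa [List.drop_drop, Nat.add_comm] using this
          simp [h1d, task9184bLoop]
        · have hjmem : j ∈ pvIdxs ')' (s + 1) t :=
            List.mem_of_mem_drop (by rw [hD]; exact List.mem_cons_self ..)
          have hjlb : s + 1 ≤ j := (pvIdxs_bounds ')' (s + 1) t j hjmem).1
          have h1d : (pvIdxs ')' (s + 1) t).drop (o + 1) = D := by
            have := congrArg (List.drop 1) hD
            simpa [List.drop_drop, Nat.add_comm] using this
          rw [h1d]
          exact pvLoop_skip _ _ _ _ (by omega))
    · by_cases h2 : c = ')'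
      · subst h2
        simp only [pvF, if_neg (show ¬ (')' = '(') from by decide), if_true]
        match o with
        | 0 =>
          show pvAg 0 s (')' :: t) = some (s + 1)
          simp only [pvAg, pvIdxs_cons_self, pvIdxs_cons_ne (show ')' ≠ '(' from by decide),
            List.length_cons, List.drop_zero]
          have hL : s ≤ s + (((t.length + 1 : Nat)) : Int) := by push_cast; omega
          rcases hO : pvIdxs '(' (s + 1) t with _ | ⟨i, r⟩
          · rw [if_pos (by simp)]
            simp only [List.nil_append, List.zip_cons_cons, task9184bLoop]
            rw [if_pos hL]
          · have hi : s + 1 ≤ i := (pvIdxs_bounds '(' (s + 1) t i (by rw [hO]; exact List.mem_cons_self ..)).1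
            split
            · simp only [List.cons_append, List.zip_cons_cons, task9184bLoop]
              rw [if_pos (by omega)]
            · simp only [List.zip_cons_cons, task9184bLoop]
              rw [if_pos (by omega)]
        | o' + 1 =>
          show pvAg (o' + 1) s (')' :: t) = pvF o' (s + 1) t
          rw [← ih o' (s + 1)]
          simp only [pvAg, pvIdxs_cons_self, pvIdxs_cons_ne (show ')' ≠ '(' from by decide),
            List.length_cons, List.drop_succ_cons]
          have hlen : s + (((t.length + 1 : Nat)) : Int) = (s + 1) + ((t.length : Nat) : Int) := by
            push_cast; ring
          rw [hlen]
          by_cases h : o' + (pvIdxs '(' (s + 1) t).length < (pvIdxs ')' (s + 1) t).length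
          · rw [if_pos (show (o' + 1) + (pvIdxs '(' (s + 1) t).length < (pvIdxs ')' (s + 1) t).length + 1 from by omega),
                if_pos h]
          · rw [if_neg (show ¬ ((o' + 1) + (pvIdxs '(' (s + 1) t).length < (pvIdxs ')' (s + 1) t).length + 1) from by omega),
                if_neg h]
      · simp only [pvF, if_neg h1, if_neg h2]
        rw [← ih o (s + 1)]
        simp only [pvAg, pvIdxs_cons_ne h1, pvIdxs_cons_ne h2, List.length_cons]
        have hlen : s + (((t.length + 1 : Nat)) : Int) = (s + 1) + ((t.length : Nat) : Int) := by
          push_cast; ring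
        rw [hlen]

theorem pad_close_noop (O : List Int) (L : Int) (hO : ∀ i ∈ O, i < L) :
    ∀ C : List Int, task9184bLoop (O.zip (C ++ [L])) = task9184bLoop (O.zip C) := by
  induction O with
  | nil => intro C; simp [List.zip]
  | cons i O' ih =>
    intro C
    match C with
    | [] =>
      have hi : i < L := hO i (by simp)
      simp [List.zip, task9184bLoop, not_le.mpr hi]
    | j :: C' =>
      simp only [List.cons_append, List.zip_cons_cons, task9184bLoop]
      split
      · rfl
      · exact ih (fun x hx => hO x (by simp [hx])) C'

-- ===== VERDICT (by name: the statement is the Claim_ definition above) =====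
theorem task9184b_spec : Claim_equal_task9184b := by
  intro sentence _
  show task9184b sentence = task9184b_alt sentence
  simp only [task9184b, task9184b_alt]
  set l := sentence.toList with hl
  have ht1 : ((PySem.List.enumerate l).filter (fun p => p.2 == '(')).map (fun p => p.1) = pvIdxs '(' 0 l := rfl
  have ht2 : ((PySem.List.enumerate l).filter (fun p => p.2 == ')')).map (fun p => p.1) = pvIdxs ')' 0 l := rfl
  have halt : task9184bScan 0 0 l = pvF 0 0 l := by
    have := pvScan_eq_pvF l 0 0
    simpa using this
  rw [ht1, ht2, halt, ← pvAg_eq_pvF l 0 0]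
  simp only [pvAg, List.drop_zero, zero_add]
  by_cases h : (pvIdxs '(' 0 l).length < (pvIdxs ')' 0 l).length
  · rw [if_pos h, if_pos h]
  · rw [if_neg h, if_neg h]
    dsimp only
    exact pad_close_noop (pvIdxs '(' 0 l) ((l.length : Nat) : Int)
      (fun i hi => by simpa using (pvIdxs_bounds '(' 0 l i hi).2) (pvIdxs ')' 0 l)
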